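-- pv_equiv track=rewrite | github.com/super30admin/BFS-2.1 | rotten_oranges.py | board_update
-- ===== SOURCE A (Python) =====
-- def board_update(grid):
--     repeat= True
--     for i in range(len(grid)):
--         for j in range(len(grid[0])):
--             if grid[i][j] == 1 :
--                 if i > 0:
--                     if grid[i-1][j] == 2:
--                         grid[i][j] = 3
--                         repeat = False
--                         continue
--                 if i < len(grid) - 1 :
--                     if grid[i+1][j] == 2:
--                         grid[i][j] = 3
--                         repeat = False
--                         continue
--                 if j > 0:
--                     #if j > 0 :
--                     if grid[i][j-1] == 2 :
--                         grid[i][j] = 3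
--                         repeat = False
--                         continue
--                 if j < len(grid[0]) - 1 :
--                     if grid[i][j+1] == 2 :
--                         grid[i][j] = 3
--                         repeat = False
--                         continue
--
--     for i in range(len(grid)):
--         for j in range(len(grid[0])):
--             if grid[i][j] == 3 :
--                 grid[i][j] = 2
--     return repeat
-- ===== SOURCE B (Python) =====
-- def board_update(grid):
--     rows = len(grid)
--     cols = len(grid[0]) if grid else 0
--     sources = [(i, j) for i in range(rows) for j in range(cols) if grid[i][j] == 2]
--     to_convert = set()
--     for (i, j) in sources:
--         for (di, dj) in ((-1, 0), (1, 0), (0, -1), (0, 1)):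
--             ni, nj = i + di, j + dj
--             if 0 <= ni < rows and 0 <= nj < cols and grid[ni][nj] == 1:
--                 to_convert.add((ni, nj))
--     for (i, j) in to_convert:
--         grid[i][j] = 2
--     return not to_convert
-- ===== Notes on version B (the rewrite author's own statement) =====
-- stated objective: alternative
-- what changed: Instead of A's cell-by-cell in-place scan with a 3-sentinel marking phase plus a second cleanup sweep, B collects the rotten sources once, computes the set of fresh neighbours to convert, writes them in one batch and returns whether the set is empty.
import Mathlib
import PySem

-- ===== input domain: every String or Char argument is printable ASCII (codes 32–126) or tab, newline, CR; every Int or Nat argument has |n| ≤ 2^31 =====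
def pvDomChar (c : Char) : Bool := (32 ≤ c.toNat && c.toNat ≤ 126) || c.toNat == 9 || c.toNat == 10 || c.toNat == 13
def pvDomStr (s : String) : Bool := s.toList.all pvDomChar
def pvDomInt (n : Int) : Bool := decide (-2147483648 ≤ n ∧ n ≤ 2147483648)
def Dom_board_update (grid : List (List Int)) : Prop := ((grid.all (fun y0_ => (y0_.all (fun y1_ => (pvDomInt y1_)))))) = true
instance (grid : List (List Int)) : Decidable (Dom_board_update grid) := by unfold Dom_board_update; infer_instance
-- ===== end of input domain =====

-- B replaces A's in-place 3-marking scan plus cleanup sweep by: collect the rotten sources once,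
-- build the set of fresh neighbours to convert, write them in one batch, return whether it is empty.
-- Both Pythons mutate `grid` in place; the equivalence proved here is about the RETURN value only
-- (A additionally rewrites any pre-existing 3 cells to 2, which B does not; the returned flag agrees).

-- ===== PORT A =====
-- grid[i][j] read/written with Nat indices; every access A makes inside Pre_ is in range (default 0 otherwise)
def pvCell (g : List (List Int)) (i j : Nat) : Int := (g.getD i []).getD j 0
def pvSetCell (g : List (List Int)) (i j : Nat) (v : Int) : List (List Int) :=
  g.set i ((g.getD i []).set j v)
-- the row-major index pairs of A's two nested `for` loops
def pvPairs (rows cols : Nat) : List (Nat × Nat) :=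
  (List.range rows).flatMap (fun i => (List.range cols).map (fun j => (i, j)))
-- one body of A's nested loop: the `continue`-chain of the four neighbour tests
def pvStepA (rows cols : Nat) (st : List (List Int) × Bool) (p : Nat × Nat) :
    List (List Int) × Bool :=
  if pvCell st.1 p.1 p.2 = 1 then
    if 0 < p.1 ∧ pvCell st.1 (p.1 - 1) p.2 = 2 then (pvSetCell st.1 p.1 p.2 3, false)
    else if p.1 < rows - 1 ∧ pvCell st.1 (p.1 + 1) p.2 = 2 then (pvSetCell st.1 p.1 p.2 3, false)
    else if 0 < p.2 ∧ pvCell st.1 p.1 (p.2 - 1) = 2 then (pvSetCell st.1 p.1 p.2 3, false)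
    else if p.2 < cols - 1 ∧ pvCell st.1 p.1 (p.2 + 1) = 2 then (pvSetCell st.1 p.1 p.2 3, false)
    else st
  else st

def board_update (grid : List (List Int)) : Bool :=
  let rows := grid.length
  let cols := (grid.headD []).length
  -- first double loop: mark fresh cells 3, clear `repeat` whenever something is marked
  let st := (pvPairs rows cols).foldl (pvStepA rows cols) (grid, true)
  -- A's second double loop rewrites the board (3 → 2) but never touches `repeat`;
  -- board mutation is not modeled (return value only), so the returned flag is st.2
  st.2

-- ===== PORT B =====
def pvDirs : List (Int × Int) := [(-1, 0), (1, 0), (0, -1), (0, 1)]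

def board_update_alt (grid : List (List Int)) : Bool :=
  let rows := grid.length
  let cols := (grid.headD []).length
  let sources := ((List.range rows).flatMap (fun i => (List.range cols).map (fun j => (i, j)))).filter
      (fun p => (grid.getD p.1 []).getD p.2 0 == 2)
  let toConvert : PySem.Set (Nat × Nat) := sources.foldl (fun s p =>
      pvDirs.foldl (fun (s : PySem.Set (Nat × Nat)) d =>
        if 0 ≤ (p.1 : Int) + d.1 ∧ (p.1 : Int) + d.1 < (rows : Int) ∧
           0 ≤ (p.2 : Int) + d.2 ∧ (p.2 : Int) + d.2 < (cols : Int) ∧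
           (grid.getD ((p.1 : Int) + d.1).toNat []).getD ((p.2 : Int) + d.2).toNat 0 = 1
        then PySem.Set.add s (((p.1 : Int) + d.1).toNat, ((p.2 : Int) + d.2).toNat) else s) s)
      PySem.Set.empty
  -- board mutation (each collected cell set to 2) not modeled; `return not to_convert`:
  toConvert.isEmpty

-- ===== PRECONDITION & SPEC =====
-- Pre_ excludes exactly the grids on which A raises IndexError: some row shorter than the first
-- (A indexes every row at columns 0..len(grid[0])-1). B raises there too.
def Pre_board_update (grid : List (List Int)) : Prop :=
  ∀ row ∈ grid, (grid.headD []).length ≤ row.length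
instance (grid : List (List Int)) : Decidable (Pre_board_update grid) := by
  unfold Pre_board_update; infer_instance
def pvWitness_board_update : List (List Int) := [[2, 1], [0, 1]]

def Spec_board_update (grid : List (List Int)) (out : Bool) : Prop := out = board_update_alt grid
instance (grid : List (List Int)) (out : Bool) : Decidable (Spec_board_update grid out) := by
  unfold Spec_board_update; infer_instance

-- ===== CLAIM (what is proved, stated in full; the proofs are below) =====
def Claim_equal_board_update : Prop := ∀ (grid : List (List Int)), Dom_board_update grid → Pre_board_update grid → Spec_board_update grid (board_update grid)

-- ===== LEMMAS AND PROOFS =====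

-- basic getD/set facts
theorem pvGetD_set_self {α : Type} (l : List α) (i : Nat) (r d : α) (h : i < l.length) :
    (l.set i r).getD i d = r := by simp [List.getD, h]

theorem pvGetD_set_ne {α : Type} (l : List α) (i a : Nat) (r d : α) (h : i ≠ a) :
    (l.set i r).getD a d = l.getD a d := by simp [List.getD, List.getElem?_set_ne h]

theorem pvGetD_oob {α : Type} (l : List α) (i : Nat) (d : α) (h : l.length ≤ i) :
    l.getD i d = d := by simp [List.getD, List.getElem?_eq_none h]

theorem pvCell_in_range {g : List (List Int)} {i j : Nat} (h : pvCell g i j ≠ 0) :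
    i < g.length ∧ j < (g.getD i []).length := by
  constructor
  · by_contra hc
    exact h (by
      show (g.getD i []).getD j 0 = 0
      rw [pvGetD_oob g i [] (by omega)]; simp [List.getD])
  · by_contra hc
    exact h (pvGetD_oob _ j 0 (by omega))

theorem pvCell_setCell_ne {i j a b : Nat} (g : List (List Int)) (v : Int)
    (h : ¬(a = i ∧ b = j)) : pvCell (pvSetCell g i j v) a b = pvCell g a b := by
  show ((g.set i ((g.getD i []).set j v)).getD a []).getD b 0 = (g.getD a []).getD b 0
  by_cases hi : i = a
  · subst hi
    have hb : j ≠ b := by tauto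
    by_cases hl : i < g.length
    · rw [pvGetD_set_self g i _ [] hl, pvGetD_set_ne _ j b _ 0 hb]
    · rw [List.set_eq_of_length_le (by omega : g.length ≤ i)]
  · rw [pvGetD_set_ne g i a _ [] hi]

theorem pvCell_setCell_self {g : List (List Int)} {i j : Nat} (v : Int)
    (hi : i < g.length) (hj : j < (g.getD i []).length) :
    pvCell (pvSetCell g i j v) i j = v := by
  show ((g.set i ((g.getD i []).set j v)).getD i []).getD j 0 = v
  rw [pvGetD_set_self g i _ [] hi, pvGetD_set_self _ j v 0 hj]

-- `A spreads into cell p this round`, stated over the ORIGINAL grid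
abbrev pvSpread (grid : List (List Int)) (rows cols : Nat) (p : Nat × Nat) : Prop :=
  pvCell grid p.1 p.2 = 1 ∧
    ((0 < p.1 ∧ pvCell grid (p.1 - 1) p.2 = 2) ∨
     (p.1 < rows - 1 ∧ pvCell grid (p.1 + 1) p.2 = 2) ∨
     (0 < p.2 ∧ pvCell grid p.1 (p.2 - 1) = 2) ∨
     (p.2 < cols - 1 ∧ pvCell grid p.1 (p.2 + 1) = 2))

-- one loop body of A, characterised against the original grid
theorem pvStepA_char (rows cols : Nat) (grid g : List (List Int)) (rep : Bool) (p : Nat × Nat)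
    (hval : pvCell g p.1 p.2 = pvCell grid p.1 p.2)
    (hiff : ∀ a b, pvCell g a b = 2 ↔ pvCell grid a b = 2) :
    pvStepA rows cols (g, rep) p =
      if pvSpread grid rows cols p then (pvSetCell g p.1 p.2 3, false) else (g, rep) := by
  unfold pvStepA
  simp only [hval, hiff]
  by_cases h0 : pvCell grid p.1 p.2 = 1
  · rw [if_pos h0]
    by_cases hc1 : 0 < p.1 ∧ pvCell grid (p.1 - 1) p.2 = 2
    · have hs : pvSpread grid rows cols p := ⟨h0, Or.inl hc1⟩
      rw [if_pos hc1, if_pos hs]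
    · rw [if_neg hc1]
      by_cases hc2 : p.1 < rows - 1 ∧ pvCell grid (p.1 + 1) p.2 = 2
      · have hs : pvSpread grid rows cols p := ⟨h0, Or.inr (Or.inl hc2)⟩
        rw [if_pos hc2, if_pos hs]
      · rw [if_neg hc2]
        by_cases hc3 : 0 < p.2 ∧ pvCell grid p.1 (p.2 - 1) = 2
        · have hs : pvSpread grid rows cols p := ⟨h0, Or.inr (Or.inr (Or.inl hc3))⟩
          rw [if_pos hc3, if_pos hs]
        · rw [if_neg hc3]
          by_cases hc4 : p.2 < cols - 1 ∧ pvCell grid p.1 (p.2 + 1) = 2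
          · have hs : pvSpread grid rows cols p := ⟨h0, Or.inr (Or.inr (Or.inr hc4))⟩
            rw [if_pos hc4, if_pos hs]
          · rw [if_neg hc4, if_neg (show ¬pvSpread grid rows cols p by
              unfold pvSpread; tauto)]
  · rw [if_neg h0, if_neg (fun hs : pvSpread grid rows cols p => h0 hs.1)]

-- A's first double loop: the flag it returns is `no cell spreads`, read off the original grid
theorem pvA_fold (grid : List (List Int)) (rows cols : Nat) :
    ∀ (L : List (Nat × Nat)) (g : List (List Int)) (rep : Bool), L.Nodup →
    (∀ a b, pvCell g a b = 2 ↔ pvCell grid a b = 2) →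
    (∀ p ∈ L, pvCell g p.1 p.2 = pvCell grid p.1 p.2) →
    (L.foldl (pvStepA rows cols) (g, rep)).2 =
      (rep && !(L.any (fun p => decide (pvSpread grid rows cols p))))
  | [], g, rep, _, _, _ => by simp
  | p :: L', g, rep, hnd, hiff, hmem => by
    have hval : pvCell g p.1 p.2 = pvCell grid p.1 p.2 := hmem p (by simp)
    rw [List.foldl_cons, pvStepA_char rows cols grid g rep p hval hiff]
    by_cases hs : pvSpread grid rows cols p
    · have hone : pvCell g p.1 p.2 = 1 := by rw [hval]; exact hs.1
      have hrange := pvCell_in_range (g := g) (i := p.1) (j := p.2) (by omega)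
      have hiff' : ∀ a b, pvCell (pvSetCell g p.1 p.2 3) a b = 2 ↔ pvCell grid a b = 2 := by
        intro a b
        by_cases hab : a = p.1 ∧ b = p.2
        · obtain ⟨h1, h2⟩ := hab; subst h1; subst h2
          rw [pvCell_setCell_self 3 hrange.1 hrange.2]
          constructor
          · intro hh; omega
          · intro hh; rw [← hval] at hh; omega
        · rw [pvCell_setCell_ne g 3 hab]; exact hiff a b
      have hmem' : ∀ q ∈ L', pvCell (pvSetCell g p.1 p.2 3) q.1 q.2 = pvCell grid q.1 q.2 := by
        intro q hq
        have hqp : q ≠ p := by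
          intro hh; subst hh; exact (List.nodup_cons.mp hnd).1 hq
        rw [pvCell_setCell_ne g 3 (by
          intro hh; exact hqp (Prod.ext hh.1 hh.2))]
        exact hmem q (by simp [hq])
      rw [if_pos hs,
        pvA_fold grid rows cols L' _ false (List.nodup_cons.mp hnd).2 hiff' hmem']
      simp only [List.any_cons]
      rw [decide_eq_true hs]
      simp
    · rw [if_neg hs,
        pvA_fold grid rows cols L' g rep (List.nodup_cons.mp hnd).2 hiff
          (fun q hq => hmem q (by simp [hq]))]
      simp only [List.any_cons]
      rw [decide_eq_false hs]
      simp

theorem pvPairs_nodup (rows cols : Nat) : (pvPairs rows cols).Nodup := by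
  have : pvPairs rows cols = (List.range rows) ×ˢ (List.range cols) := rfl
  rw [this]
  exact List.Nodup.product (List.nodup_range) (List.nodup_range)

theorem mem_pvPairs (rows cols : Nat) (p : Nat × Nat) :
    p ∈ pvPairs rows cols ↔ p.1 < rows ∧ p.2 < cols := by
  unfold pvPairs
  simp only [List.mem_flatMap, List.mem_range, List.mem_map]
  constructor
  · rintro ⟨a, ha, b, hb, rfl⟩; exact ⟨ha, hb⟩
  · rintro ⟨h1, h2⟩; exact ⟨p.1, h1, p.2, h2, rfl⟩

theorem pvSetAdd_ne_nil {α : Type} [BEq α] (s : PySem.Set α) (x : α) :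
    PySem.Set.add s x ≠ [] := by
  unfold PySem.Set.add
  split_ifs with h
  · intro hs; subst hs; simp [PySem.Set.contains] at h
  · simp

-- a guarded set-building fold is empty iff it starts empty and no guard ever fires
theorem pvInner_nil_iff {α γ : Type} [BEq α] (C : γ → Prop) [DecidablePred C] (t : γ → α) :
    ∀ (D : List γ) (s : PySem.Set α),
      (D.foldl (fun s d => if C d then PySem.Set.add s (t d) else s) s = ([] : List α)) ↔
        (s = [] ∧ ∀ d ∈ D, ¬ C d)
  | [], s => by simp
  | d :: D', s => by
    rw [List.foldl_cons]
    by_cases hc : C d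
    · rw [if_pos hc, pvInner_nil_iff C t D']
      simp only [List.mem_cons]
      constructor
      · rintro ⟨hnil, -⟩; exact absurd hnil (pvSetAdd_ne_nil s (t d))
      · rintro ⟨-, hall⟩; exact absurd hc (hall d (Or.inl rfl))
    · rw [if_neg hc, pvInner_nil_iff C t D']
      simp only [List.mem_cons]
      constructor
      · rintro ⟨hnil, hall⟩
        exact ⟨hnil, fun x hx => by rcases hx with rfl | hx; exact hc; exact hall x hx⟩
      · rintro ⟨hnil, hall⟩; exact ⟨hnil, fun x hx => hall x (Or.inr hx)⟩

theorem pvOuter_nil_iff {α β γ : Type} [BEq α] (C : β → γ → Prop) [∀ b c, Decidable (C b c)]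
    (t : β → γ → α) (D : List γ) :
    ∀ (L : List β) (s : PySem.Set α),
      (L.foldl (fun s p => D.foldl (fun s d => if C p d then PySem.Set.add s (t p d) else s) s) s
          = ([] : List α)) ↔
        (s = [] ∧ ∀ p ∈ L, ∀ d ∈ D, ¬ C p d)
  | [], s => by simp
  | p :: L', s => by
    rw [List.foldl_cons, pvOuter_nil_iff C t D L']
    constructor
    · rintro ⟨hnil, hall⟩
      have h2 := (pvInner_nil_iff (C p) (t p) D s).mp hnil
      exact ⟨h2.1, fun q hq => by
        rcases List.mem_cons.mp hq with rfl | hq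
        · exact h2.2
        · exact hall q hq⟩
    · rintro ⟨hnil, hall⟩
      refine ⟨(pvInner_nil_iff (C p) (t p) D s).mpr ⟨hnil, hall p (by simp)⟩, ?_⟩
      exact fun q hq => hall q (List.mem_cons_of_mem p hq)

-- B's guard at source p, direction d
def pvCond (grid : List (List Int)) (rows cols : Nat) (p : Nat × Nat) (d : Int × Int) : Prop :=
  0 ≤ (p.1 : Int) + d.1 ∧ (p.1 : Int) + d.1 < (rows : Int) ∧
  0 ≤ (p.2 : Int) + d.2 ∧ (p.2 : Int) + d.2 < (cols : Int) ∧
  pvCell grid ((p.1 : Int) + d.1).toNat ((p.2 : Int) + d.2).toNat = 1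

-- the bridge: A finds a cell to infect iff B finds a source with a fresh neighbour
theorem pvBridge (grid : List (List Int)) (rows cols : Nat) :
    (∃ p ∈ pvPairs rows cols, pvSpread grid rows cols p) ↔
    (∃ p ∈ (pvPairs rows cols).filter (fun p => pvCell grid p.1 p.2 == 2),
       ∃ d ∈ pvDirs, pvCond grid rows cols p d) := by
  constructor
  · rintro ⟨⟨i, j⟩, hmem, hcell, hdis⟩
    rw [mem_pvPairs] at hmem
    obtain ⟨hi, hj⟩ := hmem
    rcases hdis with ⟨hb, h2⟩ | ⟨hb, h2⟩ | ⟨hb, h2⟩ | ⟨hb, h2⟩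
    · refine ⟨(i - 1, j), ?_, (1, 0), by simp [pvDirs], ?_, ?_, ?_, ?_, ?_⟩
      · rw [List.mem_filter, mem_pvPairs]
        exact ⟨⟨by omega, by omega⟩, by simpa using h2⟩
      all_goals simp only
      · omega
      · omega
      · omega
      · omega
      · have e1 : (((i - 1 : Nat) : Int) + 1).toNat = i := by omega
        have e2 : (((j : Nat) : Int) + 0).toNat = j := by omega
        rw [e1, e2]; exact hcell
    · refine ⟨(i + 1, j), ?_, (-1, 0), by simp [pvDirs], ?_, ?_, ?_, ?_, ?_⟩
      · rw [List.mem_filter, mem_pvPairs]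
        exact ⟨⟨by omega, by omega⟩, by simpa using h2⟩
      all_goals simp only
      · omega
      · omega
      · omega
      · omega
      · have e1 : (((i + 1 : Nat) : Int) + -1).toNat = i := by omega
        have e2 : (((j : Nat) : Int) + 0).toNat = j := by omega
        rw [e1, e2]; exact hcell
    · refine ⟨(i, j - 1), ?_, (0, 1), by simp [pvDirs], ?_, ?_, ?_, ?_, ?_⟩
      · rw [List.mem_filter, mem_pvPairs]
        exact ⟨⟨by omega, by omega⟩, by simpa using h2⟩
      all_goals simp only
      · omega
      · omega
      · omega
      · omega
      · have e1 : (((i : Nat) : Int) + 0).toNat = i := by omega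
        have e2 : (((j - 1 : Nat) : Int) + 1).toNat = j := by omega
        rw [e1, e2]; exact hcell
    · refine ⟨(i, j + 1), ?_, (0, -1), by simp [pvDirs], ?_, ?_, ?_, ?_, ?_⟩
      · rw [List.mem_filter, mem_pvPairs]
        exact ⟨⟨by omega, by omega⟩, by simpa using h2⟩
      all_goals simp only
      · omega
      · omega
      · omega
      · omega
      · have e1 : (((i : Nat) : Int) + 0).toNat = i := by omega
        have e2 : (((j + 1 : Nat) : Int) + -1).toNat = j := by omega
        rw [e1, e2]; exact hcell
  · rintro ⟨⟨a, b⟩, hmem, d, hd, hc1, hc2, hc3, hc4, hc5⟩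
    rw [List.mem_filter, mem_pvPairs] at hmem
    obtain ⟨⟨ha, hb⟩, hval⟩ := hmem
    have hval2 : pvCell grid a b = 2 := by simpa using hval
    simp only [pvDirs, List.mem_cons, List.not_mem_nil, or_false] at hd
    simp only at hc1 hc2 hc3 hc4 hc5
    rcases hd with rfl | rfl | rfl | rfl
    · -- d = (-1, 0): B's target is (a-1, b); A sees it via its "down" test
      simp only at hc1 hc2 hc3 hc4 hc5
      have e1 : ((a : Int) + -1).toNat = a - 1 := by omega
      have e2 : ((b : Int) + 0).toNat = b := by omega
      rw [e1, e2] at hc5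
      refine ⟨(a - 1, b), by rw [mem_pvPairs]; exact ⟨by omega, hb⟩, hc5,
        Or.inr (Or.inl ⟨by omega, ?_⟩)⟩
      have e3 : a - 1 + 1 = a := by omega
      simp only [e3]; exact hval2
    · simp only at hc1 hc2 hc3 hc4 hc5
      have e1 : ((a : Int) + 1).toNat = a + 1 := by omega
      have e2 : ((b : Int) + 0).toNat = b := by omega
      rw [e1, e2] at hc5
      refine ⟨(a + 1, b), by rw [mem_pvPairs]; exact ⟨by omega, hb⟩, hc5,
        Or.inl ⟨by omega, ?_⟩⟩
      simp only [Nat.add_sub_cancel]; exact hval2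
    · simp only at hc1 hc2 hc3 hc4 hc5
      have e1 : ((a : Int) + 0).toNat = a := by omega
      have e2 : ((b : Int) + -1).toNat = b - 1 := by omega
      rw [e1, e2] at hc5
      refine ⟨(a, b - 1), by rw [mem_pvPairs]; exact ⟨ha, by omega⟩, hc5,
        Or.inr (Or.inr (Or.inr ⟨by omega, ?_⟩))⟩
      have e3 : b - 1 + 1 = b := by omega
      simp only [e3]; exact hval2
    · simp only at hc1 hc2 hc3 hc4 hc5
      have e1 : ((a : Int) + 0).toNat = a := by omega
      have e2 : ((b : Int) + 1).toNat = b + 1 := by omega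
      rw [e1, e2] at hc5
      refine ⟨(a, b + 1), by rw [mem_pvPairs]; exact ⟨ha, by omega⟩, hc5,
        Or.inr (Or.inr (Or.inl ⟨by omega, ?_⟩))⟩
      simp only [Nat.add_sub_cancel]; exact hval2

theorem board_update_eq_spread (grid : List (List Int)) :
    board_update grid =
      !((pvPairs grid.length (grid.headD []).length).any
          (fun p => decide (pvSpread grid grid.length (grid.headD []).length p))) := by
  unfold board_update
  rw [pvA_fold grid grid.length (grid.headD []).length
    (pvPairs grid.length (grid.headD []).length) grid true
    (pvPairs_nodup _ _) (fun _ _ => Iff.rfl) (fun _ _ => rfl)]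
  simp

theorem board_update_alt_eq_spread (grid : List (List Int)) :
    board_update_alt grid =
      !((pvPairs grid.length (grid.headD []).length).any
          (fun p => decide (pvSpread grid grid.length (grid.headD []).length p))) := by
  unfold board_update_alt
  simp only
  rw [Bool.eq_iff_iff, List.isEmpty_iff, Bool.not_eq_eq_eq_not, Bool.not_true,
    List.any_eq_false]
  rw [pvOuter_nil_iff
    (C := fun (p : Nat × Nat) (d : Int × Int) =>
      0 ≤ (p.1 : Int) + d.1 ∧ (p.1 : Int) + d.1 < (grid.length : Int) ∧
      0 ≤ (p.2 : Int) + d.2 ∧ (p.2 : Int) + d.2 < ((grid.headD []).length : Int) ∧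
      (grid.getD ((p.1 : Int) + d.1).toNat []).getD ((p.2 : Int) + d.2).toNat 0 = 1)
    (t := fun p d => (((p.1 : Int) + d.1).toNat, ((p.2 : Int) + d.2).toNat)) pvDirs]
  constructor
  · rintro ⟨-, hall⟩ p hp
    simp only [decide_eq_true_eq]
    intro hs
    have := (pvBridge grid grid.length (grid.headD []).length).mp ⟨p, hp, hs⟩
    obtain ⟨q, hq, d, hd, hc⟩ := this
    exact hall q hq d hd hc
  · intro hall
    refine ⟨rfl, fun q hq d hd hc => ?_⟩
    have := (pvBridge grid grid.length (grid.headD []).length).mpr ⟨q, hq, d, hd, hc⟩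
    obtain ⟨p, hp, hs⟩ := this
    have := hall p hp
    simp only [decide_eq_true_eq] at this
    exact this hs

-- ===== VERDICT (by name: the statement is the Claim_ definition above) =====
theorem board_update_spec : Claim_equal_board_update := by
  intro grid _ _
  unfold Spec_board_update
  rw [board_update_eq_spread, board_update_alt_eq_spread]
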